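-- pv_equiv track=rewrite | github.com/wari-wari/ddddd | Capstone/make_db.py | check
-- ===== SOURCE A (Python) =====
-- def check_speech(speech):
--     if speech == "n":
--         speech = "명사"
--         return speech
--     elif speech == "v":
--         speech = "동사"
--         return speech
--     elif speech == "adj":
--         speech = "형용사"
--         return speech
--     elif speech == "adv":
--         speech = "부사"
--         return speech
--     elif speech == "phr":
--         speech = "구"
--         return speech
--     else:
--         speech = "None"
--         return speech
--
-- def check(pre_meaning):
--     part_of_speech = ""
--     meaning = ""
--     other = pre_meaning.split("/ ")
--     if len(other) == 1:
--         temp = other[0].split(".")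
--         part_of_speech = check_speech(temp[0])
--         meaning = temp[1]
--
--     elif len(other) > 1:
--         for i in range(len(other)):
--             temp = other[i].split(".")
--             if i == 0:
--                 part_of_speech = check_speech(temp[0])
--                 meaning = temp[1]
--             elif i > 0:
--                 part_of_speech = part_of_speech + "," + check_speech(temp[0])
--                 meaning = meaning + "," + temp[1]
--
--     return part_of_speech, meaning
-- ===== SOURCE B (Python) =====
-- _SPEECH = {"n": "\uba85\uc0ac", "v": "\ub3d9\uc0ac", "adj": "\ud615\uc6a9\uc0ac", "adv": "\ubd80\uc0ac", "phr": "\uad6c"}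
--
-- def check(pre_meaning):
--     # single character-level scan: no split()/join(); a small state machine per segment
--     pos_out = ""
--     mean_out = ""
--     tok = ""     # chars before the first '.' of the current segment
--     mtok = ""    # chars between the first and second '.'
--     state = 0    # 0 = reading tok, 1 = reading mtok, 2 = past second '.'
--     first = True
--     i = 0
--     n = len(pre_meaning)
--     while i < n:
--         c = pre_meaning[i]
--         if c == '/' and i + 1 < n and pre_meaning[i + 1] == ' ':
--             if state == 0:
--                 raise ValueError("segment %r has no '.': no meaning field" % tok)
--             sep = "" if first else ","
--             pos_out += sep + _SPEECH.get(tok, "None")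
--             mean_out += sep + mtok
--             tok = ""
--             mtok = ""
--             state = 0
--             first = False
--             i += 2
--         elif state == 0:
--             if c == '.':
--                 state = 1
--             else:
--                 tok += c
--             i += 1
--         elif state == 1:
--             if c == '.':
--                 state = 2
--             else:
--                 mtok += c
--             i += 1
--         else:
--             i += 1
--     if state == 0:
--         raise ValueError("segment %r has no '.': no meaning field" % tok)
--     sep = "" if first else ","
--     return pos_out + sep + _SPEECH.get(tok, "None"), mean_out + sep + mtok
-- ===== Notes on version B (the rewrite author's own statement) =====
-- stated objective: alternative
-- what changed: B replaces A's split('/ ')/split('.') passes, branch structure and translation chain by a single character-level scan of the string: a per-segment state machine (reading part-of-speech / reading meaning / skipping) that flushes into the two accumulators at each '/ ' separator, with the table as a dict lookup.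
import Mathlib
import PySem

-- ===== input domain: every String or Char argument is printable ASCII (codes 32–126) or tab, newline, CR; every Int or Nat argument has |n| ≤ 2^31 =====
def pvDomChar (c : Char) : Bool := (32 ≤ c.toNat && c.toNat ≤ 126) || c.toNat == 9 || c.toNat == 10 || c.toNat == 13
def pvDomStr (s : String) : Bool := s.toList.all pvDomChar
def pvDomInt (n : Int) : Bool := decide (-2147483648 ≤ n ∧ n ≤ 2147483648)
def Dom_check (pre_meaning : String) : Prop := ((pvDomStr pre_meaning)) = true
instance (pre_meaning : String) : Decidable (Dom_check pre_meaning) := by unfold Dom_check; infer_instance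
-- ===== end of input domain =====

-- B replaces A's split('/ ')/split('.') passes and branch structure by one character-level
-- scan with a per-segment state machine; the equivalence is about the return value.

-- shared primitive wrapper: Python's s.split(sep) for a nonempty literal sep
def pySplit (s sep : String) : List String := (PySem.Str.split? s sep).getD []

-- ===== PORT A =====
def check_speech (speech : String) : String :=
  if speech == "n" then "명사"
  else if speech == "v" then "동사"
  else if speech == "adj" then "형용사"
  else if speech == "adv" then "부사"
  else if speech == "phr" then "구"
  else "None"

def check (pre_meaning : String) : String × String :=
  let other := pySplit pre_meaning "/ "
  if PySem.List.len other == 1 then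
    let temp := pySplit (PySem.List.pyGetD other 0 "") "."
    (check_speech (PySem.List.pyGetD temp 0 ""), PySem.List.pyGetD temp 1 "")
  else if 1 < PySem.List.len other then
    (PySem.List.pyRange 0 (PySem.List.len other) 1).foldl
      (fun (st : String × String) i =>
        let temp := pySplit (PySem.List.pyGetD other i "") "."
        if i == 0 then
          (check_speech (PySem.List.pyGetD temp 0 ""), PySem.List.pyGetD temp 1 "")
        else if 0 < i then
          (st.1 ++ "," ++ check_speech (PySem.List.pyGetD temp 0 ""),
           st.2 ++ "," ++ PySem.List.pyGetD temp 1 "")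
        else st) ("", "")
  else ("", "")

-- ===== PORT B =====
def speechDict : PySem.Dict String String :=
  PySem.Dict.ofList [("n", "명사"), ("v", "동사"), ("adj", "형용사"), ("adv", "부사"), ("phr", "구")]

-- _SPEECH.get(tok, "None") on a token accumulated as chars
def trTok (tok : List Char) : List Char :=
  (PySem.Dict.getD speechDict (String.ofList tok) "None").toList

-- the while loop of Source B: one pass over the characters; state 0/1/2 as in Source B,
-- the '/ ' lookahead is the pattern `c = '/' ∧ rest.head? = some ' '`; Source B's
-- ValueError guard (state == 0 at a flush) only fires outside Pre_check, where the
-- port flushes the (empty) running mtok instead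
def scanGo (first : Bool) (state : Nat) (pos mean tok mtok : List Char) (l : List Char) :
    List Char × List Char :=
  match l with
  | [] =>
    let sep : List Char := if first then [] else [',']
    (pos ++ sep ++ trTok tok, mean ++ sep ++ mtok)
  | c :: rest =>
    if c = '/' ∧ rest.head? = some ' ' then
      let sep : List Char := if first then [] else [',']
      scanGo false 0 (pos ++ sep ++ trTok tok) (mean ++ sep ++ mtok) [] [] rest.tail
    else if state = 0 then
      if c = '.' then scanGo first 1 pos mean tok mtok rest
      else scanGo first 0 pos mean (tok ++ [c]) mtok rest
    else if state = 1 then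
      if c = '.' then scanGo first 2 pos mean tok mtok rest
      else scanGo first 1 pos mean tok (mtok ++ [c]) rest
    else scanGo first state pos mean tok mtok rest
termination_by l.length
decreasing_by all_goals simp [List.length_tail]

def check_alt (pre_meaning : String) : String × String :=
  let r := scanGo true 0 [] [] [] [] pre_meaning.toList
  (String.ofList r.1, String.ofList r.2)

-- ===== PRECONDITION & SPEC =====
-- Pre_ excludes exactly the inputs where some '/ '-separated segment contains no '.':
-- there Python A raises IndexError on temp[1] and Python B raises ValueError.
def Pre_check (pre_meaning : String) : Prop :=
  ∀ seg ∈ pySplit pre_meaning "/ ", 2 ≤ (pySplit seg ".").length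
instance (pre_meaning : String) : Decidable (Pre_check pre_meaning) := by
  unfold Pre_check; infer_instance

def pvWitness_check : String := "n.dog/ v.run"

def Spec_check (pre_meaning : String) (out : String × String) : Prop := out = check_alt pre_meaning
instance (pre_meaning : String) (out : String × String) : Decidable (Spec_check pre_meaning out) := by unfold Spec_check; infer_instance

-- ===== CLAIM (what is proved, stated in full; the proofs are below) =====
def Claim_equal_check : Prop := ∀ (pre_meaning : String), Dom_check pre_meaning → Pre_check pre_meaning → Spec_check pre_meaning (check pre_meaning)

-- ===== LEMMAS AND PROOFS =====

-- ---- proof-layer reference functions ----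

-- per-segment results (String level, matching A's code shape)
def segPos (seg : String) : String := check_speech (PySem.List.pyGetD (pySplit seg ".") 0 "")
def segMean (seg : String) : String := PySem.List.pyGetD (pySplit seg ".") 1 ""

def consHead (p : List Char) : List (List Char) → List (List Char)
  | [] => [p]
  | s :: ss => (p ++ s) :: ss

def splitSlash (l : List Char) : List (List Char) :=
  match l with
  | [] => [[]]
  | c :: rest =>
    if c = '/' ∧ rest.head? = some ' ' then [] :: splitSlash rest.tail
    else consHead [c] (splitSlash rest)
termination_by l.length
decreasing_by all_goals simp [List.length_tail]

def splitDot : List Char → List (List Char)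
  | [] => [[]]
  | c :: rest => if c = '.' then [] :: splitDot rest else consHead [c] (splitDot rest)

-- the state machine restricted to one separator-free segment
def segProc (state : Nat) (tok mtok : List Char) : List Char → List Char × List Char
  | [] => (tok, mtok)
  | c :: rest =>
    if state = 0 then
      if c = '.' then segProc 1 tok mtok rest else segProc 0 (tok ++ [c]) mtok rest
    else if state = 1 then
      if c = '.' then segProc 2 tok mtok rest else segProc 1 tok (mtok ++ [c]) rest
    else segProc state tok mtok rest

-- ---- small structural lemmas ----

theorem consHead_ne_nil (p : List Char) (xs : List (List Char)) : consHead p xs ≠ [] := by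
  cases xs <;> simp [consHead]

theorem consHead_assoc (a b : List Char) (xs : List (List Char)) :
    consHead (a ++ b) xs = consHead a (consHead b xs) := by
  cases xs <;> simp [consHead]

theorem splitSlash_ne_nil (l : List Char) : splitSlash l ≠ [] := by
  unfold splitSlash
  split
  · simp
  · split
    · simp
    · exact consHead_ne_nil _ _

theorem splitDot_ne_nil (l : List Char) : splitDot l ≠ [] := by
  cases l with
  | nil => simp [splitDot]
  | cons c rest =>
      unfold splitDot
      split
      · simp
      · exact consHead_ne_nil _ _

theorem prefix_slash (c : Char) (rest : List Char) :
    ((['/', ' '] : List Char).isPrefixOf (c :: rest) = true) ↔ (c = '/' ∧ rest.head? = some ' ') := by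
  cases rest with
  | nil => simp [List.isPrefixOf]
  | cons d r =>
      simp only [List.isPrefixOf, List.head?_cons, Option.some.injEq, Bool.and_eq_true, beq_iff_eq]
      constructor
      · rintro ⟨h1, h2, -⟩; exact ⟨h1.symm, h2.symm⟩
      · rintro ⟨h1, h2⟩; exact ⟨h1.symm, h2.symm, trivial⟩


-- splitOn with separator "/ " computes splitSlash
theorem goSlash (fuel : Nat) : ∀ (l : List Char), l.length < fuel → ∀ (cur : List Char)
    (acc : List (List Char)),
    PySem.Chars.splitOn.go ['/', ' '] fuel l cur acc
      = acc.reverse ++ consHead cur.reverse (splitSlash l) := by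
  induction fuel with
  | zero => intro l h; omega
  | succ n ih =>
      intro l h cur acc
      cases l with
      | nil => simp [PySem.Chars.splitOn.go, splitSlash, consHead]
      | cons c rest =>
          rw [PySem.Chars.splitOn.go]
          by_cases hp : c = '/' ∧ rest.head? = some ' '
          · have hpre : (['/', ' '] : List Char).isPrefixOf (c :: rest) = true :=
              (prefix_slash c rest).mpr hp
            obtain ⟨rfl, hh⟩ := hp
            cases rest with
            | nil => simp at hh
            | cons d r =>
                simp only [List.head?_cons, Option.some.injEq] at hh
                subst hh
                rw [if_pos hpre]
                have hr : r.length < n := by simp at h; omega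
                rw [show List.drop (['/', ' '] : List Char).length ('/' :: ' ' :: r) = r by simp]
                rw [ih r hr [] ((List.reverse cur) :: acc)]
                rw [show splitSlash ('/' :: ' ' :: r) = [] :: splitSlash r by
                  rw [splitSlash]; simp]
                cases hrs : splitSlash r with
                | nil => exact absurd hrs (splitSlash_ne_nil r)
                | cons s ss => simp [consHead]
          · have hpre : (['/', ' '] : List Char).isPrefixOf (c :: rest) = false := by
              rw [← Bool.not_eq_true]; intro hcon; exact hp ((prefix_slash c rest).mp hcon)
            rw [if_neg (by simp [hpre])]
            have hr : rest.length < n := by simp at h; omega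
            rw [ih rest hr (c :: cur) acc]
            rw [show splitSlash (c :: rest) = consHead [c] (splitSlash rest) by
              rw [splitSlash]; simp [hp]]
            rw [show (c :: cur).reverse = cur.reverse ++ [c] by simp]
            rw [consHead_assoc]

theorem splitOn_slash (l : List Char) :
    PySem.Chars.splitOn l ['/', ' '] = splitSlash l := by
  rw [PySem.Chars.splitOn, goSlash (l.length + 1) l (by omega) [] []]
  cases hrs : splitSlash l with
  | nil => exact absurd hrs (splitSlash_ne_nil l)
  | cons s ss => simp [consHead]

-- splitOn with separator "." computes splitDot
theorem goDot (fuel : Nat) : ∀ (l : List Char), l.length < fuel → ∀ (cur : List Char)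
    (acc : List (List Char)),
    PySem.Chars.splitOn.go ['.'] fuel l cur acc
      = acc.reverse ++ consHead cur.reverse (splitDot l) := by
  induction fuel with
  | zero => intro l h; omega
  | succ n ih =>
      intro l h cur acc
      cases l with
      | nil => simp [PySem.Chars.splitOn.go, splitDot, consHead]
      | cons c rest =>
          rw [PySem.Chars.splitOn.go]
          by_cases hp : c = '.'
          · subst hp
            rw [if_pos (by simp [List.isPrefixOf])]
            have hr : rest.length < n := by simp at h; omega
            rw [show List.drop (['.'] : List Char).length ('.' :: rest) = rest by simp]
            rw [ih rest hr [] ((List.reverse cur) :: acc)]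
            rw [show splitDot ('.' :: rest) = [] :: splitDot rest by simp [splitDot]]
            cases hrs : splitDot rest with
            | nil => exact absurd hrs (splitDot_ne_nil rest)
            | cons s ss => simp [consHead]
          · rw [if_neg (by simp [List.isPrefixOf]; exact fun hcon => hp hcon.symm)]
            have hr : rest.length < n := by simp at h; omega
            rw [ih rest hr (c :: cur) acc]
            rw [show splitDot (c :: rest) = consHead [c] (splitDot rest) by simp [splitDot, hp]]
            rw [show (c :: cur).reverse = cur.reverse ++ [c] by simp]
            rw [consHead_assoc]

theorem splitOn_dot (l : List Char) :
    PySem.Chars.splitOn l ['.'] = splitDot l := by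
  rw [PySem.Chars.splitOn, goDot (l.length + 1) l (by omega) [] []]
  cases hrs : splitDot l with
  | nil => exact absurd hrs (splitDot_ne_nil l)
  | cons s ss => simp [consHead]

-- pySplit at the char level
theorem pySplit_slash (s : String) :
    pySplit s "/ " = (splitSlash s.toList).map String.ofList := by
  unfold pySplit
  rw [PySem.Str.split?]
  rw [show PySem.Chars.split? s.toList "/ ".toList
      = some (PySem.Chars.splitOn s.toList ['/', ' ']) by
    rw [PySem.Chars.split?]; rfl]
  simp [splitOn_slash]

theorem pySplit_dot (s : String) :
    pySplit s "." = (splitDot s.toList).map String.ofList := by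
  unfold pySplit
  rw [PySem.Str.split?]
  rw [show PySem.Chars.split? s.toList ".".toList
      = some (PySem.Chars.splitOn s.toList ['.']) by
    rw [PySem.Chars.split?]; rfl]
  simp [splitOn_dot]

theorem pySplit_ne_nil (s : String) : pySplit s "/ " ≠ [] := by
  rw [pySplit_slash]
  simp [splitSlash_ne_nil]

-- ---- the dict of B equals the if/elif chain of A ----
theorem speech_dict_eq (s : String) :
    PySem.Dict.getD speechDict s "None" = check_speech s := by
  by_cases h1 : s = "n"; · subst h1; decide
  by_cases h2 : s = "v"; · subst h2; decide
  by_cases h3 : s = "adj"; · subst h3; decide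
  by_cases h4 : s = "adv"; · subst h4; decide
  by_cases h5 : s = "phr"; · subst h5; decide
  have e1 : ("n" == s) = false := by simp [Ne.symm h1]
  have e2 : ("v" == s) = false := by simp [Ne.symm h2]
  have e3 : ("adj" == s) = false := by simp [Ne.symm h3]
  have e4 : ("adv" == s) = false := by simp [Ne.symm h4]
  have e5 : ("phr" == s) = false := by simp [Ne.symm h5]
  have hit : speechDict.items
      = [("n", "명사"), ("v", "동사"), ("adj", "형용사"), ("adv", "부사"), ("phr", "구")] := by decide
  simp [check_speech, PySem.Dict.getD, PySem.Dict.get?, hit,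
    List.find?, e1, e2, e3, e4, e5, h1, h2, h3, h4, h5]

-- ---- join lemmas (String level, for the A side) ----
theorem strJoin_singleton (a : String) : PySem.Str.join "," [a] = a := by
  apply String.toList_inj.mp
  simp [PySem.Str.toList_join, PySem.Chars.join_singleton]

theorem strJoin_cons_cons (a x : String) (l : List String) :
    PySem.Str.join "," (a :: x :: l) = a ++ "," ++ PySem.Str.join "," (x :: l) := by
  apply String.toList_inj.mp
  simp [PySem.Str.toList_join, PySem.Chars.join_cons_cons]

theorem strJoin_merge (a x : String) (l : List String) :
    PySem.Str.join "," ((a ++ "," ++ x) :: l) = a ++ "," ++ PySem.Str.join "," (x :: l) := by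
  cases l with
  | nil => rw [strJoin_singleton, strJoin_singleton]
  | cons y l' =>
      rw [strJoin_cons_cons, strJoin_cons_cons]
      simp [String.append_assoc]

-- A's tail loop equals the comma-join of the mapped tail
theorem a_loop_eq (rest : List String) (a b : String) :
    rest.foldl (fun (st : String × String) seg =>
      (st.1 ++ "," ++ segPos seg, st.2 ++ "," ++ segMean seg)) (a, b)
    = (PySem.Str.join "," (a :: rest.map segPos),
       PySem.Str.join "," (b :: rest.map segMean)) := by
  induction rest generalizing a b with
  | nil => simp [strJoin_singleton]
  | cons s rest ih =>
      simp only [List.foldl_cons, List.map_cons]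
      rw [ih, strJoin_merge, strJoin_merge, strJoin_cons_cons, strJoin_cons_cons]

-- A computes the comma-join of the per-segment results
theorem a_char (p : String) :
    check p = (PySem.Str.join "," ((pySplit p "/ ").map segPos),
               PySem.Str.join "," ((pySplit p "/ ").map segMean)) := by
  show check p = _
  unfold check
  cases hsegs : pySplit p "/ " with
  | nil => exact absurd hsegs (pySplit_ne_nil p)
  | cons s rest =>
      cases rest with
      | nil =>
          simp [PySem.List.len, PySem.List.pyGetD, PySem.List.pyGet?, PySem.List.pyIdx?,
            strJoin_singleton, segPos, segMean]
      | cons t rest' =>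
          have hlen1 : (PySem.List.len (s :: t :: rest') == (1 : Int)) = false := by
            simp [PySem.List.len]
            omega
          have hlen2 : (1 : Int) < PySem.List.len (s :: t :: rest') := by
            simp [PySem.List.len]
            try omega
          simp only [hlen1, Bool.false_eq_true, if_false, if_pos hlen2]
          rw [PySem.List.pyRange_one_cons (by simp [PySem.List.len]; omega)]
          rw [List.foldl_cons]
          have h0 : PySem.List.pyGetD (s :: t :: rest') 0 "" = s := by
            have hp : (0:Int) ≤ (rest'.length : Int) + 1 := by positivity
            simp [PySem.List.pyGetD, PySem.List.pyGet?, PySem.List.pyIdx?, hp]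
          simp only [beq_self_eq_true, if_pos, h0]
          rw [show (0:Int) + 1 = 1 from by norm_num]
          rw [PySem.List.foldl_congr_mem _ _
            (fun (st : String × String) (i : Int) =>
              (fun (st : String × String) (seg : String) =>
                (st.1 ++ "," ++ segPos seg, st.2 ++ "," ++ segMean seg)) st
                (PySem.List.pyGetD (s :: t :: rest') i ""))
            _ ?_]
          · rw [PySem.List.foldl_pyRange_pyGetD (s :: t :: rest') ""
              (fun (st : String × String) (seg : String) =>
                (st.1 ++ "," ++ segPos seg, st.2 ++ "," ++ segMean seg))
              _ (by norm_num : (0:Int) ≤ 1)]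
            simp only [Int.toNat_one, List.drop_one, List.tail_cons]
            rw [a_loop_eq]
            simp [segPos, segMean]
          · intro acc i hi
            have := (PySem.List.mem_pyRange_one.mp hi).1
            have hne : (i == (0 : Int)) = false := by
              simp; omega
            rw [hne]
            simp only [Bool.false_eq_true, if_false, if_pos (by omega : (0:Int) < i)]
            simp [segPos, segMean]

-- ---- state machine characterisation ----

theorem segProc_two (cs : List Char) : ∀ t m, segProc 2 t m cs = (t, m) := by
  induction cs with
  | nil => intro t m; simp [segProc]
  | cons c r ih => intro t m; simp [segProc, ih]

theorem segProc_one (cs : List Char) : ∀ t m,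
    segProc 1 t m cs = (t, m ++ (splitDot cs).headD []) := by
  induction cs with
  | nil => intro t m; simp [segProc, splitDot]
  | cons c r ih =>
      intro t m
      by_cases hc : c = '.'
      · subst hc
        simp [segProc, segProc_two, splitDot]
      · rw [show segProc 1 t m (c :: r) = segProc 1 t (m ++ [c]) r by simp [segProc, hc]]
        rw [ih]
        rw [show splitDot (c :: r) = consHead [c] (splitDot r) by simp [splitDot, hc]]
        cases hrs : splitDot r with
        | nil => exact absurd hrs (splitDot_ne_nil r)
        | cons s ss => simp [consHead]

theorem segProc_zero (cs : List Char) : ∀ t m,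
    segProc 0 t m cs
      = (t ++ (splitDot cs).headD [], m ++ ((splitDot cs).tail.headD [])) := by
  induction cs with
  | nil => intro t m; simp [segProc, splitDot]
  | cons c r ih =>
      intro t m
      by_cases hc : c = '.'
      · subst hc
        rw [show segProc 0 t m ('.' :: r) = segProc 1 t m r by simp [segProc]]
        rw [segProc_one]
        simp [splitDot]
      · rw [show segProc 0 t m (c :: r) = segProc 0 (t ++ [c]) m r by simp [segProc, hc]]
        rw [ih]
        rw [show splitDot (c :: r) = consHead [c] (splitDot r) by simp [splitDot, hc]]
        cases hrs : splitDot r with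
        | nil => exact absurd hrs (splitDot_ne_nil r)
        | cons s ss => simp [consHead]

-- ---- the scanner computes per-segment results joined with commas ----

def sepIf (first : Bool) : List Char := if first then [] else [',']

def pairsOf (state : Nat) (tok mtok : List Char) (l : List Char) :
    List (List Char × List Char) :=
  segProc state tok mtok ((splitSlash l).headD [])
    :: ((splitSlash l).tail).map (segProc 0 [] [])

theorem pairsOf_cons (state state' : Nat) (tok mtok tok' mtok' : List Char) (c : Char)
    (rest : List Char)
    (hns : ¬(c = '/' ∧ rest.head? = some ' '))
    (hstep : ∀ cs, segProc state tok mtok (c :: cs) = segProc state' tok' mtok' cs) :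
    pairsOf state tok mtok (c :: rest) = pairsOf state' tok' mtok' rest := by
  unfold pairsOf
  rw [show splitSlash (c :: rest) = consHead [c] (splitSlash rest) by rw [splitSlash]; simp [hns]]
  cases hs : splitSlash rest with
  | nil => exact absurd hs (splitSlash_ne_nil rest)
  | cons h t => simp [consHead, hstep]

theorem pairsOf_sep (state : Nat) (tok mtok : List Char) (c : Char) (rest : List Char)
    (hp : c = '/' ∧ rest.head? = some ' ') :
    pairsOf state tok mtok (c :: rest) = (tok, mtok) :: pairsOf 0 [] [] rest.tail := by
  unfold pairsOf
  rw [show splitSlash (c :: rest) = [] :: splitSlash rest.tail by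
    rw [splitSlash]; simp [hp]]
  cases hs : splitSlash rest.tail with
  | nil => exact absurd hs (splitSlash_ne_nil rest.tail)
  | cons h t => simp [segProc]

theorem scanGo_eq : ∀ (first : Bool) (state : Nat) (pos mean tok mtok l : List Char),
    scanGo first state pos mean tok mtok l
      = (pos ++ sepIf first
           ++ PySem.Chars.join [','] ((pairsOf state tok mtok l).map (fun p => trTok p.1)),
         mean ++ sepIf first
           ++ PySem.Chars.join [','] ((pairsOf state tok mtok l).map (fun p => p.2))) := by
  intro first state pos mean tok mtok l
  induction first, state, pos, mean, tok, mtok, l using scanGo.induct with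
  | case1 first state pos mean tok mtok =>
      rw [scanGo]
      simp [pairsOf, splitSlash, segProc, PySem.Chars.join_singleton, sepIf]
  | case2 first state pos mean tok mtok c rest hp sep ih =>
      rw [scanGo, if_pos hp]
      show scanGo false 0 (pos ++ sep ++ trTok tok) (mean ++ sep ++ mtok) [] [] rest.tail
          = (pos ++ sepIf first
               ++ PySem.Chars.join [','] ((pairsOf state tok mtok (c :: rest)).map (fun p => trTok p.1)),
             mean ++ sepIf first
               ++ PySem.Chars.join [','] ((pairsOf state tok mtok (c :: rest)).map (fun p => p.2)))
      have hsep : sep = sepIf first := rfl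
      rw [ih, pairsOf_sep state tok mtok c rest hp]
      simp only [pairsOf, List.map_cons, PySem.Chars.join_cons_cons, hsep]
      simp [sepIf, List.append_assoc]
  | case3 first pos mean tok mtok rest hp ih =>
      rw [scanGo, if_neg hp]
      simp only [reduceIte]
      rw [ih, pairsOf_cons 0 1 tok mtok tok mtok '.' rest hp (fun cs => by simp [segProc])]
  | case4 first pos mean tok mtok c rest hp hc ih =>
      rw [scanGo, if_neg hp]
      simp only [reduceIte, if_neg hc]
      rw [ih, pairsOf_cons 0 0 tok mtok (tok ++ [c]) mtok c rest hp
        (fun cs => by simp [segProc, hc])]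
  | case5 first pos mean tok mtok rest h10 hp ih =>
      rw [scanGo, if_neg hp]
      simp only [reduceIte, if_neg h10]
      rw [ih, pairsOf_cons 1 2 tok mtok tok mtok '.' rest hp (fun cs => by simp [segProc])]
  | case6 first pos mean tok mtok c rest hp hc h10 ih =>
      rw [scanGo, if_neg hp]
      simp only [reduceIte, if_neg h10, if_neg hc]
      rw [ih, pairsOf_cons 1 1 tok mtok tok (mtok ++ [c]) c rest hp
        (fun cs => by simp [segProc, hc])]
  | case7 first state pos mean tok mtok c rest hp h0 h1 ih =>
      rw [scanGo, if_neg hp]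
      simp only [if_neg h0, if_neg h1]
      rw [ih, pairsOf_cons state state tok mtok tok mtok c rest hp
        (fun cs => by simp [segProc, h0, h1])]

-- B computes the comma-join of the per-segment results, at the char level
theorem b_char (p : String) :
    check_alt p
      = (String.ofList (PySem.Chars.join [',']
            ((splitSlash p.toList).map (fun s => trTok ((splitDot s).headD [])))),
         String.ofList (PySem.Chars.join [',']
            ((splitSlash p.toList).map (fun s => (splitDot s).tail.headD [])))) := by
  unfold check_alt
  rw [scanGo_eq]
  have hpairs : pairsOf 0 [] [] p.toList
      = (splitSlash p.toList).map (fun s => segProc 0 [] [] s) := by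
    unfold pairsOf
    cases hs : splitSlash p.toList with
    | nil => exact absurd hs (splitSlash_ne_nil p.toList)
    | cons h t => simp
  simp only [hpairs, sepIf, reduceIte, List.nil_append, List.map_map]
  have h1 : ((fun p => trTok p.1) ∘ fun s => segProc 0 ([] : List Char) ([] : List Char) s)
      = (fun s => trTok ((splitDot s).headD [])) := by
    funext s; simp [segProc_zero]
  have h2 : ((fun (p : List Char × List Char) => p.2) ∘ fun s => segProc 0 ([] : List Char) ([] : List Char) s)
      = (fun s => (splitDot s).tail.headD []) := by
    funext s; simp [segProc_zero]
  rw [h1, h2]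

-- ---- per-segment bridge between the String-level and char-level results ----

theorem pyGetD_zero_cons (a : String) (l : List String) (d : String) :
    PySem.List.pyGetD (a :: l) 0 d = a := by
  have hp : (0:Int) ≤ (l.length : Int) := by positivity
  simp [PySem.List.pyGetD, PySem.List.pyGet?, PySem.List.pyIdx?, hp]

theorem pyGetD_one_cons (a b : String) (l : List String) (d : String) :
    PySem.List.pyGetD (a :: b :: l) 1 d = b := by
  have hp : (0:Int) ≤ (l.length : Int) := by positivity
  simp [PySem.List.pyGetD, PySem.List.pyGet?, PySem.List.pyIdx?, hp]

theorem pyGetD_one_single (a d : String) : PySem.List.pyGetD [a] 1 d = d := by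
  simp [PySem.List.pyGetD, PySem.List.pyGet?, PySem.List.pyIdx?]

theorem segPos_toList (s : List Char) :
    (segPos (String.ofList s)).toList = trTok ((splitDot s).headD []) := by
  unfold segPos
  rw [pySplit_dot]
  rw [show (String.ofList s).toList = s by simp]
  cases hs : splitDot s with
  | nil => exact absurd hs (splitDot_ne_nil s)
  | cons h t =>
      simp only [List.map_cons, pyGetD_zero_cons, List.headD_cons]
      rw [trTok, speech_dict_eq]

theorem segMean_toList (s : List Char) :
    (segMean (String.ofList s)).toList = (splitDot s).tail.headD [] := by
  unfold segMean
  rw [pySplit_dot]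
  rw [show (String.ofList s).toList = s by simp]
  cases hs : splitDot s with
  | nil => exact absurd hs (splitDot_ne_nil s)
  | cons h t =>
      cases t with
      | nil => simp [pyGetD_one_single]
      | cons h2 t2 => simp [pyGetD_one_cons]

-- ===== VERDICT =====
theorem joinMap_bridge (L : List (List Char)) (g : String → String) (f : List Char → List Char)
    (h : ∀ s, (g (String.ofList s)).toList = f s) :
    PySem.Str.join "," ((L.map String.ofList).map g)
      = String.ofList (PySem.Chars.join [','] (L.map f)) := by
  apply String.toList_inj.mp
  simp only [PySem.Str.toList_join, List.map_map, String.toList_ofList]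
  congr 1
  apply List.map_congr_left
  intro s _
  exact h s

theorem check_spec : Claim_equal_check := by
  intro p _ _
  unfold Spec_check
  rw [a_char, b_char, pySplit_slash]
  rw [joinMap_bridge _ segPos _ segPos_toList, joinMap_bridge _ segMean _ segMean_toList]
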